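-- pv_equiv track=rewrite | github.com/MYTE21/Data-Structure-and-Algorithm | Problems and Solutions/Heap and Priority Queue/Magician and Chocolates/magician_and_chocolates.py | magician_and_chocolates
-- ===== SOURCE A (Python) =====
-- import heapq
--
-- def magician_and_chocolates(box, taken_time):
--     max_container = []
--     chocolates = 0
--     for chocolate in box:
--         heapq.heappush(max_container, chocolate*-1)
--
--     for _ in range(taken_time):
--         box_chocolates = heapq.heappop(max_container)*-1
--         chocolates += box_chocolates
--         modified_box = box_chocolates // 2
--         heapq.heappush(max_container, modified_box*-1)
--
--     return chocolates
-- ===== SOURCE B (Python) =====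
-- def magician_and_chocolates(box, taken_time):
--     # Sorted-array priority structure instead of a binary heap:
--     # pop the last (max) element, reinsert its half keeping the list sorted.
--     arr = sorted(box)
--     total = 0
--     for _ in range(taken_time):
--         top = arr.pop()
--         total += top
--         half = top // 2
--         i = 0
--         while i < len(arr) and arr[i] <= half:
--             i += 1
--         arr.insert(i, half)
--     return total
-- ===== Notes on version B (the rewrite author's own statement) =====
-- stated objective: alternative
-- what changed: Replaces the negated binary max-heap by a sorted list maintained with pop-last (current max) and a linear ordered insertion of the halved value.
import Mathlib
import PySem

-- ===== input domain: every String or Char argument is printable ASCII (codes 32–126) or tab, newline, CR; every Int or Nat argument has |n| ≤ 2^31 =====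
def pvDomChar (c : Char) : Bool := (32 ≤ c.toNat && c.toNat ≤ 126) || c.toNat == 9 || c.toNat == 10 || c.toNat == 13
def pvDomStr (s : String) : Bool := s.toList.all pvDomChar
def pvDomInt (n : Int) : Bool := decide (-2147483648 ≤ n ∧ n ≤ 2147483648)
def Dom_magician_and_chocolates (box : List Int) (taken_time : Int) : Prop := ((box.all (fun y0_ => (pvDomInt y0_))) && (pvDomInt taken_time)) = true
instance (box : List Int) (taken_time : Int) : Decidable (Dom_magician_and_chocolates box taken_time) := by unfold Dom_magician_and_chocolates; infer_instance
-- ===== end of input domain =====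

-- B replaces the negated binary max-heap by a sorted list (pop-last max, linear ordered
-- reinsertion of the halved value): a different priority structure, similar cost (alternative).

-- ===== PORT A =====
-- heapq is a standard-library call; it is ported at contract level, exact for Int elements:
-- heappush adds the element to the heap's multiset, heappop removes and returns its minimum
-- (none exactly where Python raises IndexError on an empty heap).
def pvHeappush (h : List Int) (x : Int) : List Int := x :: h

def pvHeappop? (h : List Int) : Option (Int × List Int) :=
  match PySem.List.min? h (fun y => y) with
  | none => none
  | some m =>
    match PySem.List.remove? h m with
    | none => none
    | some rest => some (m, rest)

-- the 'for _ in range(taken_time)' loop of A, state = (max_container, chocolates)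
def pvALoop : Nat → List Int → Int → Option Int
  | 0, _, chocolates => some chocolates
  | n + 1, max_container, chocolates =>
    match pvHeappop? max_container with
    | none => none   -- heapq.heappop raises IndexError
    | some (m, rest) =>
      let box_chocolates := m * -1
      let modified_box := PySem.Int.floordiv box_chocolates 2
      pvALoop n (pvHeappush rest (modified_box * -1)) (chocolates + box_chocolates)

def magician_and_chocolates (box : List Int) (taken_time : Int) : Int :=
  let max_container := box.foldl (fun h chocolate => pvHeappush h (chocolate * -1)) []
  (pvALoop taken_time.toNat max_container 0).getD 0

-- ===== PORT B =====
-- the linear 'while i < len(arr) and arr[i] <= half' scan + arr.insert(i, half) of Source B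
def pvInsort (x : Int) : List Int → List Int
  | [] => [x]
  | a :: t => if a ≤ x then a :: pvInsort x t else x :: a :: t

-- the 'for _ in range(taken_time)' loop of B, state = (arr, total)
def pvBLoop : Nat → List Int → Int → Option Int
  | 0, _, total => some total
  | n + 1, arr, total =>
    match PySem.List.pop? arr (-1) with
    | none => none   -- arr.pop() raises IndexError
    | some (top, rest) =>
      pvBLoop n (pvInsort (PySem.Int.floordiv top 2) rest) (total + top)

def magician_and_chocolates_alt (box : List Int) (taken_time : Int) : Int :=
  (pvBLoop taken_time.toNat (PySem.List.sorted box (fun x => x) false) 0).getD 0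

-- ===== PRECONDITION & SPEC =====
-- Pre_ excludes exactly the inputs where A raises IndexError: an empty box with at least one step.
def Pre_magician_and_chocolates (box : List Int) (taken_time : Int) : Prop :=
  box = [] → taken_time ≤ 0
instance (box : List Int) (taken_time : Int) : Decidable (Pre_magician_and_chocolates box taken_time) := by unfold Pre_magician_and_chocolates; infer_instance

def pvWitness_magician_and_chocolates : List Int × Int := ([5, 3, 6], 3)

def Spec_magician_and_chocolates (box : List Int) (taken_time : Int) (out : Int) : Prop := out = magician_and_chocolates_alt box taken_time
instance (box : List Int) (taken_time : Int) (out : Int) : Decidable (Spec_magician_and_chocolates box taken_time out) := by unfold Spec_magician_and_chocolates; infer_instance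

-- ===== CLAIM =====
def Claim_equal_magician_and_chocolates : Prop := ∀ (box : List Int) (taken_time : Int), Dom_magician_and_chocolates box taken_time → Pre_magician_and_chocolates box taken_time → Spec_magician_and_chocolates box taken_time (magician_and_chocolates box taken_time)

-- ===== LEMMAS AND PROOFS =====
lemma pvInsort_perm (x : Int) (l : List Int) : (pvInsort x l).Perm (x :: l) := by
  induction l with
  | nil => simp [pvInsort]
  | cons a t ih =>
    simp only [pvInsort]
    split_ifs with h
    · exact ((ih.cons a).trans (List.Perm.swap x a t))
    · exact List.Perm.refl _

lemma pvInsort_pairwise (x : Int) (l : List Int) (hl : l.Pairwise (· ≤ ·)) :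
    (pvInsort x l).Pairwise (· ≤ ·) := by
  induction l with
  | nil => simp [pvInsort]
  | cons a t ih =>
    rw [List.pairwise_cons] at hl
    simp only [pvInsort]
    split_ifs with h
    · rw [List.pairwise_cons]
      refine ⟨fun y hy => ?_, ih hl.2⟩
      rcases List.mem_cons.mp ((pvInsort_perm x t).mem_iff.mp hy) with rfl | hy'
      · exact h
      · exact hl.1 y hy'
    · rw [List.pairwise_cons]
      refine ⟨fun y hy => ?_, List.pairwise_cons.mpr hl⟩
      rcases List.mem_cons.mp hy with rfl | hy'
      · omega
      · exact le_trans (by omega) (hl.1 y hy')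

-- main loop invariant: heap multiset = negation of the sorted list's multiset, same accumulator
lemma pvLoop_eq (n : Nat) : ∀ (h arr : List Int) (acc : Int),
    (h.map (fun x => -x)).Perm arr → arr.Pairwise (· ≤ ·) →
    pvALoop n h acc = pvBLoop n arr acc := by
  induction n with
  | zero => intro h arr acc _ _; rfl
  | succ n ih =>
    intro h arr acc hperm hsorted
    cases hh : h with
    | nil =>
      have : arr = [] := by
        have := hperm.length_eq; subst hh; simpa using this.symm
      subst this
      simp [pvALoop, pvBLoop, pvHeappop?, PySem.List.min?, PySem.List.pop?]
    | cons h0 ht =>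
      subst hh
      -- A side: heappop returns the min m
      set m : Int := ht.foldl min h0 with hmdef
      have hmin : PySem.List.min? (h0 :: ht) (fun y => y) = some m :=
        PySem.List.min?_id_cons h0 ht
      have hm_mem : m ∈ h0 :: ht := PySem.List.min?_mem hmin
      have hm_min : ∀ y ∈ h0 :: ht, m ≤ y := by
        intro y hy; exact PySem.List.min?_isMin hmin y hy
      -- B side: arr is nonempty, pop gives its last element
      have harr_ne : arr ≠ [] := by
        intro hnil; subst hnil
        simpa using hperm.length_eq
      obtain ⟨init, top, rfl⟩ :
          ∃ init top, arr = init ++ [top] := by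
        rcases List.eq_nil_or_concat arr with hnil | ⟨init, top, hct⟩
        · exact absurd hnil harr_ne
        · exact ⟨init, top, by simpa using hct⟩
      have hpop : PySem.List.pop? (init ++ [top]) (-1) = some (top, init) :=
        PySem.List.pop?_last init top
      -- top is the maximum of arr
      have htop_max : ∀ z ∈ init ++ [top], z ≤ top := by
        obtain ⟨_, _, hrel⟩ := List.pairwise_append.mp hsorted
        intro z hz
        rcases List.mem_append.mp hz with hz' | hz'
        · exact hrel z hz' top (by simp)
        · simp at hz'; omega
      -- -m is also the maximum of arr, hence top = -m
      have hneg_mem : -m ∈ init ++ [top] :=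
        hperm.mem_iff.mp (List.mem_map.mpr ⟨m, hm_mem, rfl⟩)
      have hub : ∀ z ∈ init ++ [top], z ≤ -m := by
        intro z hz
        rcases List.mem_map.mp (hperm.symm.mem_iff.mp hz) with ⟨y, hy, rfl⟩
        have := hm_min y hy; omega
      have htop : top = -m := le_antisymm (hub top (by simp)) (htop_max _ hneg_mem)
      subst htop
      -- multisets of the successor states still correspond
      have hrest : PySem.List.remove? (h0 :: ht) m = some ((h0 :: ht).erase m) :=
        PySem.List.remove?_eq_some_erase _ m hm_mem
      have herase_perm : (((h0 :: ht).erase m).map (fun x => -x)).Perm init := by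
        have h1 : (h0 :: ht).Perm (m :: (h0 :: ht).erase m) := List.perm_cons_erase hm_mem
        have h2 : ((h0 :: ht).map (fun x => -x)).Perm
            (-m :: ((h0 :: ht).erase m).map (fun x => -x)) := by
          simpa using h1.map (fun x => -x)
        have h3 : (-m :: ((h0 :: ht).erase m).map (fun x => -x)).Perm (init ++ [-m]) :=
          h2.symm.trans hperm
        have h4 : (init ++ [-m]).Perm (-m :: init) := List.perm_append_singleton (-m) init
        exact (h3.trans h4).cons_inv
      set half := PySem.Int.floordiv (-m) 2 with hhalf
      have hstep_perm :
          ((pvHeappush ((h0 :: ht).erase m) (half * -1)).map (fun x => -x)).Perm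
            (pvInsort half init) := by
        have : ((pvHeappush ((h0 :: ht).erase m) (half * -1)).map (fun x => -x)) =
            half :: ((h0 :: ht).erase m).map (fun x => -x) := by
          simp [pvHeappush]
        rw [this]
        exact ((herase_perm.cons half).trans (pvInsort_perm half init).symm)
      have hstep_sorted : (pvInsort half init).Pairwise (· ≤ ·) :=
        pvInsort_pairwise _ _ (List.pairwise_append.mp hsorted).1
      -- unfold one step of each loop
      simp only [pvALoop, pvBLoop, pvHeappop?, hmin, hrest, hpop]
      have hval : PySem.Int.floordiv (m * -1) 2 = half := by rw [hhalf]; ring_nf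
      have hacc : acc + m * -1 = acc + -m := by ring
      rw [hval, hacc]
      exact ih _ _ _ hstep_perm hstep_sorted

lemma pvInit_perm (box : List Int) :
    ((box.foldl (fun h chocolate => pvHeappush h (chocolate * -1)) []).map (fun x => -x)).Perm
      (PySem.List.sorted box (fun x => x) false) := by
  have hfold : ∀ (acc : List Int),
      box.foldl (fun h chocolate => pvHeappush h (chocolate * -1)) acc
        = (box.map (fun c => c * -1)).reverse ++ acc := by
    induction box with
    | nil => intro acc; simp
    | cons b t ih => intro acc; simp [pvHeappush]
  have h1 : (box.foldl (fun h chocolate => pvHeappush h (chocolate * -1)) []).map (fun x => -x)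
      = box.reverse := by
    rw [hfold []]
    simp [← List.map_reverse]
  rw [h1]
  exact (List.reverse_perm box).trans (PySem.List.sorted_perm box (fun x => x) false).symm

-- ===== VERDICT =====
theorem magician_and_chocolates_spec : Claim_equal_magician_and_chocolates := by
  intro box taken_time _ _
  unfold Spec_magician_and_chocolates magician_and_chocolates magician_and_chocolates_alt
  exact congrArg (Option.getD · 0)
    (pvLoop_eq taken_time.toNat _ _ 0 (pvInit_perm box)
      (PySem.List.sorted_pairwise box (fun x => x)))
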